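-- pv_equiv track=rewrite | github.com/HazimEmam/Connect-4-AI-Game | MinMax.py | getMaxElements
-- ===== SOURCE A (Python) =====
-- def getMaxElements(arr):
--     maxElement = -5
--     newArr = []
--     for i in range(0, len(arr)):
--         if arr[i][0] > maxElement:
--             maxElement = arr[i][0]
--     for i in range(0, len(arr)):
--         if arr[i][0] == maxElement:
--             newArr.append(arr[i])
--     return newArr
-- ===== SOURCE B (Python) =====
-- def getMaxElements(arr):
--     curMax = -5
--     newArr = []
--     for e in arr:
--         if e[0] > curMax:
--             curMax = e[0]
--             newArr = [e]
--         elif e[0] == curMax: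
--             newArr.append(e)
--     return newArr
-- ===== Notes on version B (the rewrite author's own statement) =====
-- stated objective: alternative
-- what changed: Single pass maintaining the running maximum, resetting the collected list whenever a new maximum appears, instead of one pass to find the max followed by a second filtering pass.
import Mathlib
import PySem

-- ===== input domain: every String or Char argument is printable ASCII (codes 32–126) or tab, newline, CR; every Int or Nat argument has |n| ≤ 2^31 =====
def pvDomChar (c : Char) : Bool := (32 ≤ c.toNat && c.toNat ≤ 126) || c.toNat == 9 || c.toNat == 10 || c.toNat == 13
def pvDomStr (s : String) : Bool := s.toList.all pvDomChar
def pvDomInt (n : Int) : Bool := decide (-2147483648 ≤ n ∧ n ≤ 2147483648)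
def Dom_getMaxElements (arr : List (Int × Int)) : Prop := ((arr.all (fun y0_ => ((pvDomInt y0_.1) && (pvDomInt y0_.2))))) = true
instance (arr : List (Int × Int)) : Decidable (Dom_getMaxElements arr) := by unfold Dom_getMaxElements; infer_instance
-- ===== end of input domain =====

-- B replaces A's two passes (find the max, then filter) by a single pass that keeps the
-- running max and resets the collected list when a new max appears (objective: alternative single pass).


-- ===== PORT A =====
-- first loop: maxElement := -5; if arr[i][0] > maxElement then update
def pvMaxA (arr : List (Int × Int)) : Int :=
  arr.foldl (fun m e => if e.1 > m then e.1 else m) (-5)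

-- second loop: append entries whose first component equals maxElement
def getMaxElements (arr : List (Int × Int)) : List (Int × Int) :=
  arr.foldl (fun acc e => if e.1 = pvMaxA arr then acc ++ [e] else acc) []

-- ===== PORT B =====
-- single pass: state (curMax, newArr); new max resets the list, equal max appends
def pvStepB (p : Int × List (Int × Int)) (e : Int × Int) : Int × List (Int × Int) :=
  if e.1 > p.1 then (e.1, [e])
  else if e.1 = p.1 then (p.1, p.2 ++ [e])
  else p

def getMaxElements_alt (arr : List (Int × Int)) : List (Int × Int) :=
  (arr.foldl pvStepB (-5, [])).2

-- ===== PRECONDITION & SPEC =====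
def Spec_getMaxElements (arr : List (Int × Int)) (out : List (Int × Int)) : Prop := out = getMaxElements_alt arr
instance (arr : List (Int × Int)) (out : List (Int × Int)) : Decidable (Spec_getMaxElements arr out) := by unfold Spec_getMaxElements; infer_instance

-- ===== CLAIM (what is proved, stated in full; the proofs are below) =====
def Claim_equal_getMaxElements : Prop := ∀ (arr : List (Int × Int)), Dom_getMaxElements arr → Spec_getMaxElements arr (getMaxElements arr)

-- ===== LEMMAS AND PROOFS =====

-- the running max never decreases below its seed
theorem pv_le_foldl_max (xs : List (Int × Int)) (m : Int) :
    m ≤ xs.foldl (fun m e => if e.1 > m then e.1 else m) m := by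
  induction xs generalizing m with
  | nil => simp
  | cons e t ih =>
    simp only [List.foldl_cons]
    split
    · exact le_trans (le_of_lt (by assumption)) (ih e.1)
    · exact ih m

-- A's second loop is a filter
theorem pv_foldl_filter (xs : List (Int × Int)) (M : Int) (acc : List (Int × Int)) :
    xs.foldl (fun acc e => if e.1 = M then acc ++ [e] else acc) acc
      = acc ++ xs.filter (fun e => e.1 = M) := by
  induction xs generalizing acc with
  | nil => simp
  | cons e t ih =>
    simp only [List.foldl_cons, List.filter_cons]
    by_cases h : e.1 = M <;> simp [h, ih]

-- invariant of B's single pass: the final max is A's fold, and the list is acc (if the max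
-- never rose above m) followed by the entries of xs hitting the final max
theorem pv_stepB_inv (xs : List (Int × Int)) (m : Int) (acc : List (Int × Int)) :
    xs.foldl pvStepB (m, acc)
      = (xs.foldl (fun m e => if e.1 > m then e.1 else m) m,
         (if xs.foldl (fun m e => if e.1 > m then e.1 else m) m = m then acc else [])
           ++ xs.filter (fun e => e.1 = xs.foldl (fun m e => if e.1 > m then e.1 else m) m)) := by
  induction xs generalizing m acc with
  | nil => simp
  | cons e t ih =>
    simp only [List.foldl_cons]
    by_cases h1 : e.1 > m
    · rw [show pvStepB (m, acc) e = (e.1, [e]) by simp [pvStepB, h1]]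
      rw [ih]
      have hge : e.1 ≤ t.foldl (fun m e => if e.1 > m then e.1 else m) e.1 := pv_le_foldl_max t e.1
      have hne : t.foldl (fun m e => if e.1 > m then e.1 else m) e.1 ≠ m := by omega
      simp only [if_pos h1, if_neg hne, List.filter_cons]
      by_cases h2 : e.1 = t.foldl (fun m e => if e.1 > m then e.1 else m) e.1
      · rw [if_pos h2.symm]; simp [← h2]
      · have : ¬ t.foldl (fun m e => if e.1 > m then e.1 else m) e.1 = e.1 := fun h => h2 h.symm
        simp [h2, this]
    · by_cases h2 : e.1 = m
      · rw [show pvStepB (m, acc) e = (m, acc ++ [e]) by simp [pvStepB, h1, h2]]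
        rw [ih]
        simp only [if_neg h1, List.filter_cons]
        by_cases h3 : t.foldl (fun m e => if e.1 > m then e.1 else m) m = m
        · simp [h3, h2]
        · have : e.1 ≠ t.foldl (fun m e => if e.1 > m then e.1 else m) m := by rw [h2]; exact fun h => h3 h.symm
          simp [h3, this]
      · rw [show pvStepB (m, acc) e = (m, acc) by simp [pvStepB, h1, h2]]
        rw [ih]; simp only [if_neg h1]
        have hge : m ≤ t.foldl (fun m e => if e.1 > m then e.1 else m) m := pv_le_foldl_max t m
        have : e.1 ≠ t.foldl (fun m e => if e.1 > m then e.1 else m) m := by omega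
        simp [List.filter_cons, this]

-- ===== VERDICT (by name: the statement is the Claim_ definition above) =====
theorem getMaxElements_spec : Claim_equal_getMaxElements := by
  intro arr _
  unfold Spec_getMaxElements getMaxElements getMaxElements_alt pvMaxA
  rw [pv_foldl_filter, pv_stepB_inv]
  simp
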